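-- pv_equiv track=rewrite | github.com/hongyi-zhao/lyx | lib/scripts/prefs2prefs_prefs.py | get_format
-- ===== SOURCE A (Python) =====
-- def get_format(line):
-- 	entries = []
-- 	i = 0
-- 	while i < len(line):
-- 		if line[i] == '"':
-- 			beg = i + 1
-- 			i = i + 1
-- 			while i < len(line) and line[i] != '"':
-- 				if line[i] == '\\' and i < len(line) - 1 and line[i+1] == '"':
-- 					# convert \" to "
-- 					i = i + 1
-- 				i = i + 1
-- 			end = i
-- 			entries.append(line[beg:end].replace('\\"', '"'))
-- 		elif line[i] == '#':
-- 			return entries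
-- 		elif not line[i].isspace():
-- 			beg = i
-- 			while i < len(line) and not line[i].isspace():
-- 				i = i + 1
-- 			end = i
-- 			entries.append(line[beg:end])
-- 		i = i + 1
-- 	return entries
-- ===== SOURCE B (Python) =====
-- import re
--
-- # Regex tokenizer: ordered alternatives -- quoted chunk (optional closing quote,
-- # \" escapes), '#' at a token start (comment: stop), bare non-space run.
-- _TOKEN = re.compile(r'"((?:\\"|[^"])*)"?|(#)|\S+')
--
--
-- def get_format(line):
--     entries = []
--     for m in _TOKEN.finditer(line):
--         if m.group(2):
--             break
--         if m.group(1) is not None: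
--             entries.append(m.group(1).replace('\\"', '"'))
--         else:
--             entries.append(m.group(0))
--     return entries
-- ===== Notes on version B (the rewrite author's own statement) =====
-- stated objective: faster
-- what changed: Replaces the manual index walk with nested while-loops by a compiled regex of ordered alternatives (quoted chunk with optional closing quote, '#' at token start, bare non-space run) iterated with re.finditer, whitespace being skipped implicitly between matches.
import Mathlib
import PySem

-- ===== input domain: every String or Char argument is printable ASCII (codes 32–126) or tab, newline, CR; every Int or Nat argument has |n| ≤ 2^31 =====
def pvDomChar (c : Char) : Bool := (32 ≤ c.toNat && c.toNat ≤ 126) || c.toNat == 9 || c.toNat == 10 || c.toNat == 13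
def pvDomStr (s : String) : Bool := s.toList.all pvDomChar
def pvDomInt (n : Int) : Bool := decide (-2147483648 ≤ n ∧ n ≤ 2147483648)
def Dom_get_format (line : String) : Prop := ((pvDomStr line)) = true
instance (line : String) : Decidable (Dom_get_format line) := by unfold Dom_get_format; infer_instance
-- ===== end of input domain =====

-- B tokenizes by a regex with ordered alternatives (ported as structural recursion on the
-- remaining characters, the deterministic run of that regex) instead of A's manual index walk.
-- The fuel arguments below only make the recursions structural; they are always sufficient.

-- ===== PORT A =====
-- inner while of the quoted branch: advance i past escaped quotes to the closing '"' (or end)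
def pvScanQ (cs : List Char) : Nat → Nat → Nat
  | 0, i => i
  | fuel + 1, i =>
    if h : i < cs.length then
      if cs[i] = '"' then i
      else if cs[i] = '\\' ∧ i < cs.length - 1 ∧ cs[i+1]? = some '"' then
        pvScanQ cs fuel (i + 2)
      else pvScanQ cs fuel (i + 1)
    else i

-- inner while of the bare-word branch: advance i while non-space
def pvScanW (cs : List Char) : Nat → Nat → Nat
  | 0, i => i
  | fuel + 1, i =>
    if h : i < cs.length then
      if PySem.Chars.isspace cs[i] = false then pvScanW cs fuel (i + 1) else i
    else i

-- outer while of A, carrying entries and the index i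
def pvLoopA (cs : List Char) : Nat → List String → Nat → List String
  | 0, entries, _ => entries
  | fuel + 1, entries, i =>
    if h : i < cs.length then
      if cs[i] = '"' then
        pvLoopA cs fuel (entries ++ [String.ofList (PySem.Chars.replace
          (PySem.List.slice cs (some ((i + 1 : Nat) : Int))
            (some ((pvScanQ cs cs.length (i + 1) : Nat) : Int)))
          ['\\', '"'] ['"'])]) (pvScanQ cs cs.length (i + 1) + 1)
      else if cs[i] = '#' then entries
      else if PySem.Chars.isspace cs[i] = false then
        pvLoopA cs fuel (entries ++ [String.ofList
          (PySem.List.slice cs (some ((i : Nat) : Int))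
            (some ((pvScanW cs cs.length i : Nat) : Int)))]) (pvScanW cs cs.length i + 1)
      else pvLoopA cs fuel entries (i + 1)
    else entries

def get_format (line : String) : List String := pvLoopA line.toList line.toList.length [] 0

-- ===== PORT B =====
def pvWs (c : Char) : Bool := PySem.Chars.isspace c

-- the quoted alternative `"((?:\\"|[^"])*)"?`: raw captured group and the rest after the
-- (optional) closing quote, by ordered alternation exactly as the regex engine consumes it
def pvQuoted : Nat → List Char → List Char × List Char
  | _, [] => ([], [])
  | 0, _ => ([], [])
  | fuel + 1, c :: r =>
    if c = '"' then ([], r)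
    else if c = '\\' ∧ r.head? = some '"' then
      (c :: '"' :: (pvQuoted fuel r.tail).1, (pvQuoted fuel r.tail).2)
    else (c :: (pvQuoted fuel r).1, (pvQuoted fuel r).2)

-- the run of re.finditer: at each position try the ordered alternatives, advance one
-- position when none of them matches (whitespace), stop at a '#' token, else emit and continue
def pvTokens : Nat → List Char → List String
  | _, [] => []
  | 0, _ => []
  | fuel + 1, c :: rest =>
    if pvWs c then pvTokens fuel rest
    else if c = '#' then []
    else if c = '"' then
      String.ofList (PySem.Chars.replace (pvQuoted rest.length rest).1 ['\\', '"'] ['"']) ::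
        pvTokens fuel (pvQuoted rest.length rest).2
    else
      String.ofList (c :: rest.takeWhile (fun d => !pvWs d)) ::
        pvTokens fuel (rest.dropWhile (fun d => !pvWs d))

def get_format_alt (line : String) : List String :=
  pvTokens (line.toList.length + 1) line.toList

-- ===== PRECONDITION & SPEC =====
def Spec_get_format (line : String) (out : List String) : Prop := out = get_format_alt line
instance (line : String) (out : List String) : Decidable (Spec_get_format line out) := by unfold Spec_get_format; infer_instance

-- ===== CLAIM (what is proved, stated in full; the proofs are below) =====
def Claim_equal_get_format : Prop := ∀ (line : String), Dom_get_format line → Spec_get_format line (get_format line)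

-- ===== LEMMAS AND PROOFS =====

-- canonical-fuel tokenizer, a proof-side abbreviation for pvTokens with sufficient fuel
def pvT (l : List Char) : List String := pvTokens (l.length + 1) l

theorem pvDrop_cons (cs : List Char) (i : Nat) (h : i < cs.length) :
    cs.drop i = cs[i] :: cs.drop (i + 1) := by
  exact (List.getElem_cons_drop h).symm

theorem pvQuoted_nil (f : Nat) : pvQuoted f [] = ([], []) := by cases f <;> rfl

theorem pvTokens_nil (f : Nat) : pvTokens f [] = [] := by cases f <;> rfl

theorem pvQuoted_snd_le : ∀ (f : Nat) (l : List Char), ((pvQuoted f l).2).length ≤ l.length := by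
  intro f
  induction f with
  | zero => intro l; cases l <;> simp [pvQuoted]
  | succ f ih =>
    intro l
    cases l with
    | nil => simp [pvQuoted_nil]
    | cons c r =>
      rw [pvQuoted]
      by_cases h1 : c = '"'
      · simp [h1]
      · by_cases h2 : c = '\\' ∧ r.head? = some '"'
        · have ht : r.tail.length ≤ r.length := by cases r <;> simp
          have hq := ih r.tail
          simp only [h2]
          simp
          omega
        · have hq := ih r
          simp only [h1, h2, if_neg, not_false_iff]
          simp
          omega

theorem pvTokens_fuel_aux : ∀ (n : Nat) (l : List Char) (f f' : Nat),
    l.length ≤ n → l.length < f → l.length < f' → pvTokens f l = pvTokens f' l := by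
  intro n
  induction n with
  | zero =>
    intro l f f' hn _ _
    have : l = [] := List.eq_nil_of_length_eq_zero (by omega)
    subst this
    rw [pvTokens_nil, pvTokens_nil]
  | succ n ih =>
    intro l f f' hn hf hf'
    cases l with
    | nil => rw [pvTokens_nil, pvTokens_nil]
    | cons c rest =>
      simp only [List.length_cons] at hn hf hf'
      cases f with
      | zero => omega
      | succ g =>
        cases f' with
        | zero => omega
        | succ g' =>
          rw [pvTokens, pvTokens]
          by_cases hw : pvWs c = true
          · rw [if_pos hw, if_pos hw]
            exact ih rest g g' (by omega) (by omega) (by omega)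
          · rw [if_neg hw, if_neg hw]
            by_cases hh : c = '#'
            · rw [if_pos hh, if_pos hh]
            · rw [if_neg hh, if_neg hh]
              by_cases hq : c = '"'
              · have hle := pvQuoted_snd_le rest.length rest
                rw [if_pos hq, if_pos hq, ih _ g g' (by omega) (by omega) (by omega)]
              · have hle := List.length_dropWhile_le (fun d => !pvWs d) rest
                rw [if_neg hq, if_neg hq, ih _ g g' (by omega) (by omega) (by omega)]

theorem pvTokens_fuel (l : List Char) (f : Nat) (hf : l.length < f) :
    pvTokens f l = pvT l :=
  pvTokens_fuel_aux l.length l f (l.length + 1) (le_refl _) hf (by omega)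

theorem pvT_cons_ws {c : Char} (r : List Char) (hw : pvWs c = true) :
    pvT (c :: r) = pvT r := by
  unfold pvT
  simp only [List.length_cons]
  rw [pvTokens]
  simp [hw]

theorem pvT_cons_hash (r : List Char) : pvT ('#' :: r) = [] := by
  unfold pvT
  simp only [List.length_cons]
  rw [pvTokens, if_neg (by decide), if_pos rfl]

theorem pvT_cons_quote (r : List Char) :
    pvT ('"' :: r) =
      String.ofList (PySem.Chars.replace (pvQuoted r.length r).1 ['\\', '"'] ['"']) ::
        pvT (pvQuoted r.length r).2 := by
  unfold pvT
  simp only [List.length_cons]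
  have hle := pvQuoted_snd_le r.length r
  rw [pvTokens, if_neg (by decide), if_neg (by decide), if_pos rfl,
    pvTokens_fuel _ _ (by omega)]
  rfl

theorem pvT_cons_bare {c : Char} (r : List Char) (hw : pvWs c = false)
    (hh : ¬ c = '#') (hq : ¬ c = '"') :
    pvT (c :: r) =
      String.ofList (c :: r.takeWhile (fun d => !pvWs d)) ::
        pvT (r.dropWhile (fun d => !pvWs d)) := by
  unfold pvT
  simp only [List.length_cons]
  have hle := List.length_dropWhile_le (fun d => !pvWs d) r
  rw [pvTokens, if_neg (by simp [hw]), if_neg hh, if_neg hq,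
    pvTokens_fuel _ _ (by omega)]
  rfl

theorem pvScanQ_ge (cs : List Char) : ∀ (f i : Nat), i ≤ pvScanQ cs f i := by
  intro f
  induction f with
  | zero => intro i; simp [pvScanQ]
  | succ f ih =>
    intro i
    rw [pvScanQ]
    split_ifs with h h1 h2
    · omega
    · have := ih (i + 2); omega
    · have := ih (i + 1); omega
    · omega

theorem pvScanW_ge (cs : List Char) : ∀ (f i : Nat), i ≤ pvScanW cs f i := by
  intro f
  induction f with
  | zero => intro i; simp [pvScanW]
  | succ f ih =>
    intro i
    rw [pvScanW]
    split_ifs with h h1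
    · have := ih (i + 1); omega
    · omega
    · omega

theorem pvQuoted_drop (cs : List Char) : ∀ (fq i fb : Nat),
    cs.length - i ≤ fq → cs.length - i ≤ fb →
    pvQuoted fb (cs.drop i) =
      ((cs.drop i).take (pvScanQ cs fq i - i), cs.drop (pvScanQ cs fq i + 1)) := by
  intro fq
  induction fq with
  | zero =>
    intro i fb hq hb
    have hlen : cs.length ≤ i := by omega
    have h0 : cs.drop i = [] := List.drop_eq_nil_of_le hlen
    have h1 : cs.drop (i + 1) = [] := List.drop_eq_nil_of_le (by omega)
    rw [h0, pvQuoted_nil]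
    simp [pvScanQ, h1]
  | succ fq ih =>
    intro i fb hqf hbf
    by_cases h : i < cs.length
    · cases fb with
      | zero => omega
      | succ g =>
        rw [pvDrop_cons cs i h, pvQuoted, pvScanQ]
        simp only [dif_pos h]
        by_cases hq : cs[i] = '"'
        · simp [hq]
        · by_cases hesc : cs[i] = '\\' ∧ i < cs.length - 1 ∧ cs[i+1]? = some '"'
          · have h1 : i + 1 < cs.length := by omega
            have hc1 : cs[i+1] = '"' := by
              have := hesc.2.2
              rwa [List.getElem?_eq_getElem h1, Option.some.injEq] at this
            have hhead : (cs.drop (i + 1)).head? = some '"' := by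
              rw [List.head?_drop, List.getElem?_eq_getElem h1, hc1]
            have htail : (cs.drop (i + 1)).tail = cs.drop (i + 2) := by
              rw [List.tail_drop]
            have hge : i + 2 ≤ pvScanQ cs fq (i + 2) := pvScanQ_ge cs fq (i + 2)
            have hrec := ih (i + 2) g (by omega) (by omega)
            have harith : pvScanQ cs fq (i + 2) - i = (pvScanQ cs fq (i + 2) - (i + 2)) + 1 + 1 := by
              omega
            rw [if_neg hq, if_neg hq, if_pos ⟨hesc.1, hhead⟩, if_pos hesc, htail, hrec,
              pvDrop_cons cs (i + 1) h1, hc1, harith, List.take_succ_cons,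
              List.take_succ_cons]
          · have hge : i + 1 ≤ pvScanQ cs fq (i + 1) := pvScanQ_ge cs fq (i + 1)
            have hrec := ih (i + 1) g (by omega) (by omega)
            have hcond : ¬ (cs[i] = '\\' ∧ (cs.drop (i + 1)).head? = some '"') := by
              rintro ⟨hb, hh⟩
              rw [List.head?_drop] at hh
              have h1 : i + 1 < cs.length := by
                by_contra hc
                rw [List.getElem?_eq_none (by omega)] at hh
                simp at hh
              exact hesc ⟨hb, by omega, hh⟩
            have harith : pvScanQ cs fq (i + 1) - i = (pvScanQ cs fq (i + 1) - (i + 1)) + 1 := by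
              omega
            rw [if_neg hq, if_neg hq, if_neg hcond, if_neg hesc, hrec, harith,
              List.take_succ_cons]
    · have hlen : cs.length ≤ i := by omega
      have h0 : cs.drop i = [] := List.drop_eq_nil_of_le hlen
      have h1 : cs.drop (i + 1) = [] := List.drop_eq_nil_of_le (by omega)
      have hs : pvScanQ cs (fq + 1) i = i := by rw [pvScanQ]; simp [Nat.not_lt.mpr hlen]
      rw [h0, pvQuoted_nil, hs, h1]
      simp

theorem pvScanW_take (cs : List Char) : ∀ (fw i : Nat), cs.length - i ≤ fw →
    (cs.drop i).takeWhile (fun d => !pvWs d) = (cs.drop i).take (pvScanW cs fw i - i) := by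
  intro fw
  induction fw with
  | zero =>
    intro i hw
    have h0 : cs.drop i = [] := List.drop_eq_nil_of_le (by omega)
    simp [h0]
  | succ fw ih =>
    intro i hwf
    by_cases h : i < cs.length
    · rw [pvScanW]
      simp only [dif_pos h]
      by_cases hw : PySem.Chars.isspace cs[i] = false
      · have hnw : pvWs cs[i] = false := by simp [pvWs, hw]
        have hge := pvScanW_ge cs fw (i + 1)
        have harith : pvScanW cs fw (i + 1) - i = pvScanW cs fw (i + 1) - (i + 1) + 1 := by
          omega
        rw [pvDrop_cons cs i h, List.takeWhile_cons_of_pos (by simp [hnw]),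
          ih (i + 1) (by omega), if_pos hw, harith, List.take_succ_cons]
      · have hsp : PySem.Chars.isspace cs[i] = true := by simpa using hw
        rw [pvDrop_cons cs i h, List.takeWhile_cons_of_neg (by simp [pvWs, hsp]), if_neg hw]
        simp
    · have h0 : cs.drop i = [] := List.drop_eq_nil_of_le (by omega)
      simp [h0]

theorem pvScanW_drop (cs : List Char) : ∀ (fw i : Nat), cs.length - i ≤ fw →
    (cs.drop i).dropWhile (fun d => !pvWs d) = cs.drop (pvScanW cs fw i) := by
  intro fw
  induction fw with
  | zero =>
    intro i hw
    have h0 : cs.drop i = [] := List.drop_eq_nil_of_le (by omega)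
    simp [h0, pvScanW]
  | succ fw ih =>
    intro i hwf
    by_cases h : i < cs.length
    · rw [pvScanW]
      simp only [dif_pos h]
      by_cases hw : PySem.Chars.isspace cs[i] = false
      · have hnw : pvWs cs[i] = false := by simp [pvWs, hw]
        rw [pvDrop_cons cs i h, List.dropWhile_cons_of_pos (by simp [hnw]),
          ih (i + 1) (by omega), if_pos hw]
      · have hsp : PySem.Chars.isspace cs[i] = true := by simpa using hw
        rw [pvDrop_cons cs i h, List.dropWhile_cons_of_neg (by simp [pvWs, hsp]), if_neg hw,
          ← pvDrop_cons cs i h]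
    · have h0 : cs.drop i = [] := List.drop_eq_nil_of_le (by omega)
      have hs : pvScanW cs (fw + 1) i = i := by rw [pvScanW]; simp [h]
      rw [h0, hs, h0]
      simp

theorem pvScanW_succ (cs : List Char) : ∀ (fw i : Nat), cs.length - i ≤ fw →
    pvT (cs.drop (pvScanW cs fw i)) = pvT (cs.drop (pvScanW cs fw i + 1)) := by
  intro fw
  induction fw with
  | zero =>
    intro i hw
    have h0 : cs.drop i = [] := List.drop_eq_nil_of_le (by omega)
    have h1 : cs.drop (i + 1) = [] := List.drop_eq_nil_of_le (by omega)
    simp [pvScanW, h0, h1]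
  | succ fw ih =>
    intro i hwf
    by_cases h : i < cs.length
    · rw [pvScanW]
      simp only [dif_pos h]
      by_cases hw : PySem.Chars.isspace cs[i] = false
      · rw [if_pos hw]
        exact ih (i + 1) (by omega)
      · have hsp : PySem.Chars.isspace cs[i] = true := by simpa using hw
        rw [if_neg hw, pvDrop_cons cs i h, pvT_cons_ws _ (by simp [pvWs, hsp])]
    · have hge : cs.length ≤ i := by omega
      have hs : pvScanW cs (fw + 1) i = i := by rw [pvScanW]; simp [Nat.not_lt.mpr hge]
      have h0 : cs.drop i = [] := List.drop_eq_nil_of_le (by omega)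
      have h1 : cs.drop (i + 1) = [] := List.drop_eq_nil_of_le (by omega)
      rw [hs, h0, h1]

theorem pvLoopA_eq (cs : List Char) : ∀ (fuel i : Nat) (entries : List String),
    cs.length - i ≤ fuel →
    pvLoopA cs fuel entries i = entries ++ pvT (cs.drop i) := by
  intro fuel
  induction fuel with
  | zero =>
    intro i entries hf
    have h0 : cs.drop i = [] := List.drop_eq_nil_of_le (by omega)
    simp [pvLoopA, h0, pvT, pvTokens_nil]
  | succ fuel ih =>
    intro i entries hf
    by_cases h : i < cs.length
    · rw [pvLoopA]
      simp only [dif_pos h]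
      by_cases hq : cs[i] = '"'
      · have hge : i + 1 ≤ pvScanQ cs cs.length (i + 1) := pvScanQ_ge cs cs.length (i + 1)
        have hqd := pvQuoted_drop cs cs.length (i + 1) ((cs.drop (i + 1)).length)
          (by omega) (by simp)
        have hsl : PySem.List.slice cs (some ((i + 1 : Nat) : Int))
            (some ((pvScanQ cs cs.length (i + 1) : Nat) : Int)) =
            (cs.drop (i + 1)).take (pvScanQ cs cs.length (i + 1) - (i + 1)) :=
          PySem.List.slice_natCast cs (i + 1) (pvScanQ cs cs.length (i + 1))
        rw [if_pos hq, ih (pvScanQ cs cs.length (i + 1) + 1) _ (by omega),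
          pvDrop_cons cs i h, hq, pvT_cons_quote]
        have hlen : (cs.drop (i + 1)).length = cs.length - (i + 1) := by simp
        rw [hqd, hsl]
        simp
      · by_cases hh : cs[i] = '#'
        · rw [if_neg hq, if_pos hh, pvDrop_cons cs i h, hh, pvT_cons_hash]
          simp
        · by_cases hw : PySem.Chars.isspace cs[i] = false
          · have hge : i ≤ pvScanW cs cs.length i := pvScanW_ge cs cs.length i
            have hnw : pvWs cs[i] = false := by simp [pvWs, hw]
            have hsl : PySem.List.slice cs (some ((i : Nat) : Int))
                (some ((pvScanW cs cs.length i : Nat) : Int)) =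
                (cs.drop i).take (pvScanW cs cs.length i - i) :=
              PySem.List.slice_natCast cs i (pvScanW cs cs.length i)
            rw [if_neg hq, if_neg hh, if_pos hw, ih (pvScanW cs cs.length i + 1) _ (by omega),
              hsl, ← pvScanW_take cs cs.length i (by omega),
              ← pvScanW_succ cs cs.length i (by omega), ← pvScanW_drop cs cs.length i (by omega)]
            rw [pvDrop_cons cs i h, List.takeWhile_cons_of_pos (by simp [hnw]),
              List.dropWhile_cons_of_pos (by simp [hnw]), pvT_cons_bare _ hnw hh hq]
            simp
          · have hsp : PySem.Chars.isspace cs[i] = true := by simpa using hw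
            rw [if_neg hq, if_neg hh, if_neg hw, ih (i + 1) _ (by omega),
              pvDrop_cons cs i h, pvT_cons_ws _ (by simp [pvWs, hsp])]
    · have h0 : cs.drop i = [] := List.drop_eq_nil_of_le (by omega)
      rw [pvLoopA]
      simp [Nat.not_lt.mpr (by omega : cs.length ≤ i), h0, pvT, pvTokens_nil]

-- ===== VERDICT (by name: the statement is the Claim_ definition above) =====
theorem get_format_spec : Claim_equal_get_format := by
  intro line _
  unfold Spec_get_format get_format get_format_alt
  simpa [pvT] using pvLoopA_eq line.toList line.toList.length 0 [] (by omega)
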